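-- pv_equiv track=rewrite | github.com/EyreC/PythonCiphers | ciphers.py | alphabetRange
-- ===== SOURCE A (Python) =====
-- def alphabetRange(numList):
--     """
--     Parameters
--     ----------
--     numlist: list,int
--         list of numbers
--
--     Returns
--     -------
--     list,int
--         list of numbers each noramlised to range(0,26)
--     """
--
--     returnNumList = []
--
--     for i in numList:
--         if str(i)[-1].isdigit():
--             if i > 0:
--                 while i > 25:
--                     i-=25
--                 returnNumList.append(i)
--             else:
--                 while i < 0:
--                     i+=25
--                 returnNumList.append(i)
--         else:
--             returnNumList.append(i)
--     return returnNumList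
-- ===== SOURCE B (Python) =====
-- def alphabetRange(numList):
--     return [((i - 1) % 25) + 1 if i > 0 else i % 25 for i in numList]
-- ===== Notes on version B (the rewrite author's own statement) =====
-- stated objective: faster
-- what changed: Replaces A's per-element while-loops that repeatedly add/subtract 25 (and the always-true str(i)[-1].isdigit() test) with a single modular-arithmetic formula per element: ((i-1) % 25) + 1 for positive i, i % 25 otherwise.
import Mathlib
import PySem

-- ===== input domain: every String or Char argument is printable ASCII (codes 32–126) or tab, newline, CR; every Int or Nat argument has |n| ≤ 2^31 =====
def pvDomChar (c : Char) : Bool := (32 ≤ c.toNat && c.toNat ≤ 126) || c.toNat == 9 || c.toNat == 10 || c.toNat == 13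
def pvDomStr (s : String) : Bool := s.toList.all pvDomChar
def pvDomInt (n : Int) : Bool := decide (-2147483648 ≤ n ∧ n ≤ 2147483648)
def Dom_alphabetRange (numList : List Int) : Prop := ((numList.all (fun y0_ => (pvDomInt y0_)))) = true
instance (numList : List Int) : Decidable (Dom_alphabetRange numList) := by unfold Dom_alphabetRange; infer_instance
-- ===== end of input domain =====

-- B replaces A's repeated ±25 subtraction/addition loops by one modular-arithmetic formula per element (O(n) instead of O(sum |i|)).

-- ===== PORT A =====
-- str(i)[-1].isdigit(): last character of str(i); the none branch is Python's IndexError, unreachable since str(i) is never empty.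
def pvLastIsDigit (i : Int) : Bool :=
  match PySem.Chars.pyGet? (PySem.Int.toChars i) (-1) with
  | some c => PySem.Chars.strIsdigit [c]
  | none => false

-- 'while i > 25: i -= 25'
def pvReducePos (i : Int) : Int :=
  if 25 < i then pvReducePos (i - 25) else i
termination_by i.toNat
decreasing_by omega

-- 'while i < 0: i += 25'
def pvReduceNeg (i : Int) : Int :=
  if i < 0 then pvReduceNeg (i + 25) else i
termination_by (-i).toNat
decreasing_by omega

def alphabetRange (numList : List Int) : List Int :=
  numList.foldl (fun returnNumList i =>
    if pvLastIsDigit i then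
      if 0 < i then returnNumList ++ [pvReducePos i]
      else returnNumList ++ [pvReduceNeg i]
    else returnNumList ++ [i]) []

-- ===== PORT B =====
def alphabetRange_alt (numList : List Int) : List Int :=
  numList.map (fun i => if 0 < i then PySem.Int.mod (i - 1) 25 + 1 else PySem.Int.mod i 25)

-- ===== PRECONDITION & SPEC =====
def Spec_alphabetRange (numList : List Int) (out : List Int) : Prop := out = alphabetRange_alt numList
instance (numList : List Int) (out : List Int) : Decidable (Spec_alphabetRange numList out) := by unfold Spec_alphabetRange; infer_instance

-- ===== CLAIM (what is proved, stated in full; the proofs are below) =====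
def Claim_equal_alphabetRange : Prop := ∀ (numList : List Int), Dom_alphabetRange numList → Spec_alphabetRange numList (alphabetRange numList)

-- ===== LEMMAS AND PROOFS =====

-- Nat.toDigitsCore only prepends characters to its accumulator.
theorem pv_toDigitsCore_suffix : ∀ (fuel n : Nat) (ds : List Char),
    ∃ pre, Nat.toDigitsCore 10 fuel n ds = pre ++ ds := by
  intro fuel
  induction fuel with
  | zero => intro n ds; exact ⟨[], rfl⟩
  | succ f ih =>
    intro n ds
    rw [Nat.toDigitsCore]
    split
    · exact ⟨[Nat.digitChar (n % 10)], rfl⟩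
    · obtain ⟨pre, hp⟩ := ih (n / 10) (Nat.digitChar (n % 10) :: ds)
      exact ⟨pre ++ [Nat.digitChar (n % 10)], by simp [hp]⟩

-- str(m) for a natural m ends in the digit character of m % 10.
theorem pv_toDigits_ends (m : Nat) :
    ∃ pre, Nat.toDigits 10 m = pre ++ [Nat.digitChar (m % 10)] := by
  rw [Nat.toDigits, Nat.toDigitsCore]
  split
  · exact ⟨[], rfl⟩
  · obtain ⟨pre, hp⟩ := pv_toDigitsCore_suffix m (m / 10) [Nat.digitChar (m % 10)]
    exact ⟨pre, hp⟩

theorem pv_digitChar_isdigit (k : Nat) (hk : k < 10) :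
    PySem.Chars.strIsdigit [Nat.digitChar k] = true := by
  interval_cases k <;> decide

-- the 'str(i)[-1].isdigit()' test is true for every integer
theorem pvLastIsDigit_true (i : Int) : pvLastIsDigit i = true := by
  unfold pvLastIsDigit PySem.Int.toChars PySem.Chars.pyGet?
  split_ifs with h
  · obtain ⟨pre, hp⟩ := pv_toDigits_ends i.natAbs
    rw [hp, show '-' :: (pre ++ [Nat.digitChar (i.natAbs % 10)]) =
        ('-' :: pre) ++ [Nat.digitChar (i.natAbs % 10)] from rfl,
      PySem.List.pyGet?_neg_one_append_singleton]
    exact pv_digitChar_isdigit _ (Nat.mod_lt _ (by norm_num))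
  · obtain ⟨pre, hp⟩ := pv_toDigits_ends i.toNat
    rw [hp, PySem.List.pyGet?_neg_one_append_singleton]
    exact pv_digitChar_isdigit _ (Nat.mod_lt _ (by norm_num))

theorem pvReducePos_eq : ∀ (n : Nat) (i : Int), i.toNat = n → 0 < i →
    pvReducePos i = PySem.Int.mod (i - 1) 25 + 1 := by
  intro n
  induction n using Nat.strong_induction_on with
  | _ n ih =>
    intro i hn hi
    rw [pvReducePos]
    split_ifs with h
    · rw [ih (i - 25).toNat (by omega) (i - 25) rfl (by omega)]
      rw [PySem.Int.mod_eq_emod_of_pos (by norm_num),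
          PySem.Int.mod_eq_emod_of_pos (by norm_num)]
      omega
    · rw [PySem.Int.mod_eq_emod_of_pos (by norm_num)]
      omega

theorem pvReduceNeg_eq : ∀ (n : Nat) (i : Int), (-i).toNat = n → i ≤ 0 →
    pvReduceNeg i = PySem.Int.mod i 25 := by
  intro n
  induction n using Nat.strong_induction_on with
  | _ n ih =>
    intro i hn hi
    rw [pvReduceNeg]
    split_ifs with h
    · by_cases h2 : i + 25 ≤ 0
      · rw [ih (-(i + 25)).toNat (by omega) (i + 25) rfl h2]
        rw [PySem.Int.mod_eq_emod_of_pos (by norm_num),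
            PySem.Int.mod_eq_emod_of_pos (by norm_num)]
        omega
      · rw [pvReduceNeg, if_neg (by omega),
            PySem.Int.mod_eq_emod_of_pos (by norm_num)]
        omega
    · rw [PySem.Int.mod_eq_emod_of_pos (by norm_num)]
      omega

theorem pv_foldl_eq (acc : List Int) (l : List Int) :
    l.foldl (fun returnNumList i =>
      if pvLastIsDigit i then
        if 0 < i then returnNumList ++ [pvReducePos i]
        else returnNumList ++ [pvReduceNeg i]
      else returnNumList ++ [i]) acc
    = acc ++ l.map (fun i => if 0 < i then PySem.Int.mod (i - 1) 25 + 1 else PySem.Int.mod i 25) := by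
  induction l generalizing acc with
  | nil => simp
  | cons x xs ih =>
    simp only [List.foldl_cons, List.map_cons]
    rw [pvLastIsDigit_true x]
    simp only [if_true]
    split_ifs with h
    · rw [pvReducePos_eq x.toNat x rfl h, ih]
      simp
    · rw [pvReduceNeg_eq (-x).toNat x rfl (by omega), ih]
      simp

-- ===== VERDICT (by name: the statement is the Claim_ definition above) =====
theorem alphabetRange_spec : Claim_equal_alphabetRange := by
  intro numList _
  unfold Spec_alphabetRange alphabetRange alphabetRange_alt
  rw [pv_foldl_eq]
  simp
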